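-- pv_equiv track=rewrite | github.com/stevolopolis/GrTrainer_paperspace | rsm_compare_reps.py | format_rsm_list
-- ===== SOURCE A (Python) =====
-- def format_rsm_list(rsm_list):
--     new_rsm = {}
--     for rsm in rsm_list:
--         for key in rsm.keys():
--             if key not in new_rsm.keys():
--                 new_rsm[key] = [rsm[key]]
--             else:
--                 new_rsm[key].append(rsm[key])
--
--     return new_rsm
-- ===== SOURCE B (Python) =====
-- def format_rsm_list(rsm_list):
--     all_keys = dict.fromkeys(k for rsm in rsm_list for k in rsm)
--     return {k: [rsm[k] for rsm in rsm_list if k in rsm] for k in all_keys}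
-- ===== Notes on version B (the rewrite author's own statement) =====
-- stated objective: alternative
-- what changed: Instead of one incremental grouping pass that creates/appends per-key lists in a mutable dict, B first collects the ordered set of all keys and then builds the result with a dict comprehension that rescans the list once per distinct key.
import Mathlib
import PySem

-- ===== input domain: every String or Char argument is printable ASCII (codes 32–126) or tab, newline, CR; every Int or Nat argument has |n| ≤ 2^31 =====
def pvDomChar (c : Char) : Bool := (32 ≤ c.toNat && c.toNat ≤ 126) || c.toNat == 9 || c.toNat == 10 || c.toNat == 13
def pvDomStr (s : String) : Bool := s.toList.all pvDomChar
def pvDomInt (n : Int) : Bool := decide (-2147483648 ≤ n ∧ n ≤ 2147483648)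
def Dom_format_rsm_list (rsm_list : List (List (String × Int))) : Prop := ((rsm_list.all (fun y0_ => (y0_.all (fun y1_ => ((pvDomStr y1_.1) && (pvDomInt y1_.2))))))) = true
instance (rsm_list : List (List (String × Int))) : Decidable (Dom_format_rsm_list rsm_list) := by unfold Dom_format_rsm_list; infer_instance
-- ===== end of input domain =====

-- B groups the same dict values by key via an ordered key-set plus one comprehension rescan per
-- distinct key, instead of A's single incremental create-or-append pass over a mutable dict.

-- ===== PORT A =====
-- Each inner dict arrives as its association list; 'rsm.keys()' (a dict's distinct keys, in
-- insertion order) is PySem.Set.ofList of the firsts, 'rsm[key]' is the dict lookup (first match).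
def format_rsm_list (rsm_list : List (List (String × Int))) : List (String × List Int) :=
  (rsm_list.foldl (fun new_rsm rsm =>
      (PySem.Set.ofList (rsm.map Prod.fst)).foldl (fun d key =>
        if ¬ (d.contains key) then
          d.insert key [(PySem.Dict.mk rsm).getD key 0]
        else
          d.modify key [] (fun l => l ++ [(PySem.Dict.mk rsm).getD key 0])) new_rsm)
    PySem.Dict.empty).items

-- ===== PORT B =====
-- Source B: all_keys = dict.fromkeys(k for rsm in rsm_list for k in rsm)  (ordered dedup);
--       {k: [rsm[k] for rsm in rsm_list if k in rsm] for k in all_keys}  (guarded lookup = filterMap get?).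
def format_rsm_list_alt (rsm_list : List (List (String × Int))) : List (String × List Int) :=
  let all_keys := PySem.List.dedup (rsm_list.flatMap (fun rsm => rsm.map Prod.fst))
  all_keys.map (fun k => (k, rsm_list.filterMap (fun rsm => (PySem.Dict.mk rsm).get? k)))

-- ===== PRECONDITION & SPEC =====
def Spec_format_rsm_list (rsm_list : List (List (String × Int))) (out : List (String × List Int)) : Prop := out = format_rsm_list_alt rsm_list
instance (rsm_list : List (List (String × Int))) (out : List (String × List Int)) : Decidable (Spec_format_rsm_list rsm_list out) := by unfold Spec_format_rsm_list; infer_instance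

-- ===== CLAIM (what is proved, stated in full; the proofs are below) =====
def Claim_equal_format_rsm_list : Prop := ∀ (rsm_list : List (List (String × Int))), Dom_format_rsm_list rsm_list → Spec_format_rsm_list rsm_list (format_rsm_list rsm_list)

-- ===== LEMMAS AND PROOFS =====

-- A's create-or-append branch is exactly one Dict.modify with default [].
theorem if_insert_eq_modify (d : PySem.Dict String (List Int)) (k : String) (v : Int) :
    (if ¬ (d.contains k) then d.insert k [v]
     else d.modify k [] (fun l => l ++ [v])) = d.modify k [] (fun l => l ++ [v]) := by
  by_cases h : d.contains k
  · simp [h]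
  · have hg : d.getD k ([] : List Int) = [] :=
      PySem.Dict.getD_of_not_contains d [] (by simpa using h)
    simp [h, PySem.Dict.modify, hg]

-- updating with the deduplicated list is updating with the list
theorem set_update_ofList {α : Type} [BEq α] [LawfulBEq α] (s : PySem.Set α) (xs : List α) :
    PySem.Set.update s (PySem.Set.ofList xs) = PySem.Set.update s xs := by
  induction xs using List.reverseRecOn generalizing s with
  | nil => simp [PySem.Set.ofList_nil]
  | append_singleton ys y ih =>
    rw [PySem.Set.ofList_append_singleton]
    by_cases hy : y ∈ PySem.Set.ofList ys
    · have hy' : y ∈ PySem.Set.update s ys := by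
        rw [PySem.Set.mem_update]; right; simpa [PySem.Set.mem_ofList] using hy
      rw [PySem.Set.add_of_mem hy, ih, PySem.Set.update_append,
        show PySem.Set.update (PySem.Set.update s ys) [y]
          = PySem.Set.add (PySem.Set.update s ys) y from rfl,
        PySem.Set.add_of_mem hy']
    · rw [PySem.Set.add_of_not_mem hy, PySem.Set.update_append, ih, PySem.Set.update_append]

-- a Nodup dict is its keys paired with their values
theorem items_eq_keys_map (d : PySem.Dict String (List Int)) (h : d.keys.Nodup) :
    d.items = d.keys.map (fun k => (k, d.getD k [])) := by
  conv_lhs => rw [← List.map_id d.items]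
  rw [show d.keys = d.items.map Prod.fst from rfl, List.map_map]
  refine List.map_congr_left (fun p hp => ?_)
  have hv : d.getD p.1 ([] : List Int) = p.2 :=
    PySem.Dict.getD_of_mem_items d (by simpa using hp) h []
  simp [Function.comp, hv]

-- one inner pass over rsm's keys, expressed with modify only
def stepD (d : PySem.Dict String (List Int)) (rsm : List (String × Int)) : PySem.Dict String (List Int) :=
  (PySem.Set.ofList (rsm.map Prod.fst)).foldl
    (fun d key => d.modify key [] (fun l => l ++ [(PySem.Dict.mk rsm).getD key 0])) d

theorem keys_stepD (d : PySem.Dict String (List Int)) (rsm : List (String × Int)) :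
    (stepD d rsm).keys = PySem.Set.update d.keys (PySem.Set.ofList (rsm.map Prod.fst)) :=
  PySem.Dict.keys_foldl_modify _ _ _ _

theorem nodup_keys_stepD (d : PySem.Dict String (List Int)) (rsm : List (String × Int))
    (h : d.keys.Nodup) : (stepD d rsm).keys.Nodup := by
  rw [keys_stepD]; exact PySem.Set.nodup_update _ _ h

-- what a modify-append loop over a key list does to one entry
theorem getD_foldl_modify_keys (ks : List String) (g : String → Int)
    (d : PySem.Dict String (List Int)) (c : String) :
    (ks.foldl (fun d k => d.modify k [] (fun l => l ++ [g k])) d).getD c []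
      = d.getD c [] ++ (ks.filter (fun k => k == c)).map g := by
  induction ks generalizing d with
  | nil => simp
  | cons k ks ih =>
    rw [List.foldl_cons, ih, PySem.Dict.getD_modify, List.filter_cons]
    by_cases hk : k = c
    · simp [hk]
    · simp [hk, Ne.symm hk]

-- a Nodup key list filtered to one key
theorem filter_beq_of_nodup (ks : List String) (c : String) (h : ks.Nodup) :
    ks.filter (fun k => k == c) = if c ∈ ks then [c] else [] := by
  induction ks with
  | nil => simp
  | cons k ks ih =>
    rw [List.filter_cons]
    by_cases hk : k = c
    · subst hk
      obtain ⟨h1, h2⟩ := List.nodup_cons.mp h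
      have hnil : ks.filter (fun x => x == k) = [] :=
        List.filter_eq_nil_iff.mpr (fun x hx => by
          simp only [beq_iff_eq]; rintro rfl; exact h1 hx)
      simp [hnil]
    · simp only [List.nodup_cons] at h
      simp [hk, ih h.2, Ne.symm hk]

theorem getD_stepD (d : PySem.Dict String (List Int)) (rsm : List (String × Int)) (c : String) :
    (stepD d rsm).getD c [] = d.getD c [] ++ ((PySem.Dict.mk rsm).get? c).toList := by
  unfold stepD
  rw [getD_foldl_modify_keys, filter_beq_of_nodup _ _ (PySem.Set.nodup_ofList _)]
  congr 1
  by_cases hc : c ∈ PySem.Set.ofList (rsm.map Prod.fst)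
  · have hsome : (PySem.Dict.mk rsm).get? c ≠ none := by
      rw [Ne, PySem.Dict.get?_eq_none_iff_not_mem_keys, not_not]
      simpa [PySem.Set.mem_ofList, PySem.Dict.keys_mk] using hc
    obtain ⟨v, hv⟩ := Option.ne_none_iff_exists'.mp hsome
    have hget : (PySem.Dict.mk rsm).getD c 0 = v := PySem.Dict.getD_of_get?_eq_some _ 0 hv
    simp [hc, hv, hget]
  · have hnone : (PySem.Dict.mk rsm).get? c = none := by
      rw [PySem.Dict.get?_eq_none_iff_not_mem_keys]
      simpa [PySem.Set.mem_ofList, PySem.Dict.keys_mk] using hc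
    simp [hc, hnone]

-- the loop invariant of A's outer pass
theorem main_inv (L : List (List (String × Int))) (d : PySem.Dict String (List Int))
    (hd : d.keys.Nodup) :
    (L.foldl stepD d).items
      = (PySem.Set.update d.keys (L.flatMap (fun r => r.map Prod.fst))).map
          (fun k => (k, d.getD k [] ++ L.filterMap (fun r => (PySem.Dict.mk r).get? k))) := by
  induction L generalizing d with
  | nil =>
    simp [PySem.Set.update_nil, items_eq_keys_map d hd]
  | cons rsm L ih =>
    rw [List.foldl_cons, ih (stepD d rsm) (nodup_keys_stepD d rsm hd), keys_stepD,
      set_update_ofList, ← PySem.Set.update_append, ← List.flatMap_cons]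
    refine List.map_congr_left (fun k _ => ?_)
    rw [getD_stepD]
    cases hg : (PySem.Dict.mk rsm).get? k <;> simp [hg]

-- ===== VERDICT (by name: the statement is the Claim_ definition above) =====
theorem format_rsm_list_spec : Claim_equal_format_rsm_list := by
  intro rsm_list _
  unfold Spec_format_rsm_list format_rsm_list format_rsm_list_alt
  simp only [if_insert_eq_modify]
  rw [show (fun (new_rsm : PySem.Dict String (List Int)) (rsm : List (String × Int)) =>
      (PySem.Set.ofList (rsm.map Prod.fst)).foldl (fun d key =>
        d.modify key [] (fun l => l ++ [(PySem.Dict.mk rsm).getD key 0])) new_rsm) = stepD from rfl]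
  rw [main_inv _ _ (by simp [PySem.Dict.keys_empty])]
  simp [PySem.Dict.getD_empty, PySem.List.dedup_eq_ofList, PySem.Set.update,
    PySem.Set.ofList_eq_foldl, PySem.Dict.keys_empty]
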